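-- pv_equiv track=rewrite | github.com/CyberNet-Works/progress_tracker | Python/python_competition/sequence and loops/#check_if_n_is_both_square_root_and_cube.py | is_cubic_square
-- ===== SOURCE A (Python) =====
-- def is_cubic_square(n):
--     if n < 0:
--         return False
--
--     square_root = False
--
--     for x in range(n + 1):
--         if x * x == n:
--             square_root = True
--
--     cube_root = False
--
--     for y in range(n + 1):
--         if y * y * y == n:
--             cube_root = True
--
--     return cube_root == square_root == True
-- ===== SOURCE B (Python) =====
-- def is_cubic_square(n):
--     if n < 0:
--         return False
--     for k in range(n + 1):
--         if k ** 6 == n: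
--             return True
--     return False
-- ===== Notes on version B (the rewrite author's own statement) =====
-- stated objective: alternative
-- what changed: Replaces the two full scans testing squareness and cubeness separately by a single early-exit loop testing the combined sixth-power condition, using the fact that a non-negative integer is both a perfect square and a perfect cube iff it is a perfect sixth power.
import Mathlib
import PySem

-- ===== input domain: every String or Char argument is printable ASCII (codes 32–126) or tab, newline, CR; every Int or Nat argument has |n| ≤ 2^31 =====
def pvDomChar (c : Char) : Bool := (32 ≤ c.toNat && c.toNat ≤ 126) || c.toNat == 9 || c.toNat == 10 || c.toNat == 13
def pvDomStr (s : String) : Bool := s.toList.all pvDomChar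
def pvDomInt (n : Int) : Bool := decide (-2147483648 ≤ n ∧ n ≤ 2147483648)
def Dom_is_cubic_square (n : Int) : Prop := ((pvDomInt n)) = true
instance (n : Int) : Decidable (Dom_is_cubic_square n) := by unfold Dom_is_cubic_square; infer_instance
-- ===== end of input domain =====

-- B replaces A's two separate full scans (square test, cube test) by one early-exit
-- scan for the combined sixth-power condition k**6 == n; same asymptotic cost.

-- ===== PORT A =====
def is_cubic_square (n : Int) : Bool :=
  if n < 0 then false
  else
    let square_root :=
      (PySem.List.pyRange 0 (n + 1) 1).foldl
        (fun square_root x => if x * x == n then true else square_root) false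
    let cube_root :=
      (PySem.List.pyRange 0 (n + 1) 1).foldl
        (fun cube_root y => if y * y * y == n then true else cube_root) false
    -- chained comparison: cube_root == square_root == True
    (cube_root == square_root) && (square_root == true)

-- ===== PORT B =====
def is_cubic_square_alt (n : Int) : Bool :=
  if n < 0 then false
  else (PySem.List.pyRange 0 (n + 1) 1).any (fun k => k ^ 6 == n)

-- ===== PRECONDITION & SPEC =====
def Spec_is_cubic_square (n : Int) (out : Bool) : Prop := out = is_cubic_square_alt n
instance (n : Int) (out : Bool) : Decidable (Spec_is_cubic_square n out) := by unfold Spec_is_cubic_square; infer_instance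

-- ===== CLAIM (what is proved, stated in full; the proofs are below) =====
def Claim_equal_is_cubic_square : Prop := ∀ (n : Int), Dom_is_cubic_square n → Spec_is_cubic_square n (is_cubic_square n)

-- ===== LEMMAS AND PROOFS =====

-- A's "latch a flag" loop equals List.any
theorem flag_foldl_eq_any (p : Int → Bool) (l : List Int) (s : Bool) :
    l.foldl (fun s x => if p x then true else s) s = (s || l.any p) := by
  induction l generalizing s with
  | nil => simp
  | cons a t ih =>
      simp only [List.foldl_cons, List.any_cons, ih]
      by_cases h : p a = true <;> simp [h]

-- b² ∣ b³, b ∣ a, cancel: a² = b³ in ℕ forces a common sixth-power root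
theorem nat_sq_eq_cube (a b : ℕ) (h : a ^ 2 = b ^ 3) : ∃ c : ℕ, a = c ^ 3 ∧ b = c ^ 2 := by
  rcases Nat.eq_zero_or_pos b with hb | hb
  · subst hb
    have : a = 0 := by nlinarith
    exact ⟨0, by simp [this]⟩
  · have hdvd : b ∣ a := by
      have h2 : b ^ 2 ∣ a ^ 2 := ⟨b, by rw [h]; ring⟩
      exact (Nat.pow_dvd_pow_iff (by norm_num)).mp h2
    obtain ⟨c, hc⟩ := hdvd
    have hcb : b = c ^ 2 := by
      have h' : b ^ 2 * b = b ^ 2 * c ^ 2 := by nlinarith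
      have := Nat.eq_of_mul_eq_mul_left (by positivity : 0 < b ^ 2) h'
      omega
    exact ⟨c, by rw [hc, hcb]; ring, hcb⟩

-- for 0 ≤ k, lower powers are below the sixth power
theorem pow_le_six (k : Int) (hk : 0 ≤ k) (m : ℕ) (hm1 : 1 ≤ m) (hm : m ≤ 6) : k ^ m ≤ k ^ 6 := by
  rcases eq_or_lt_of_le hk with h0 | h1
  · rw [← h0]
    simp [zero_pow (by omega : m ≠ 0)]
  · exact pow_le_pow_right₀ (by omega) hm

-- the key arithmetic fact, phrased over the search range 0..n
theorem six_iff (n : Int) (_hn : 0 ≤ n) :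
    ((∃ x, (0 ≤ x ∧ x < n + 1) ∧ x * x = n) ∧ (∃ y, (0 ≤ y ∧ y < n + 1) ∧ y * y * y = n)) ↔
    (∃ k, (0 ≤ k ∧ k < n + 1) ∧ k ^ 6 = n) := by
  constructor
  · rintro ⟨⟨x, ⟨hx0, _⟩, hx⟩, ⟨y, ⟨hy0, _⟩, hy⟩⟩
    obtain ⟨a, rfl⟩ := Int.eq_ofNat_of_zero_le hx0
    obtain ⟨b, rfl⟩ := Int.eq_ofNat_of_zero_le hy0
    have hab : a ^ 2 = b ^ 3 := by
      have h' : ((a : ℤ)) ^ 2 = ((b : ℤ)) ^ 3 := by nlinarith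
      exact_mod_cast h'
    obtain ⟨c, hc3, hc2⟩ := nat_sq_eq_cube a b hab
    have hcn : ((c : ℤ)) ^ 6 = n := by
      have h' : (a : ℤ) * a = n := hx
      push_cast [hc3] at h'
      nlinarith [h']
    refine ⟨(c : ℤ), ⟨by positivity, ?_⟩, hcn⟩
    have hle : (c : ℤ) ≤ (c : ℤ) ^ 6 := by
      calc (c : ℤ) = (c : ℤ) ^ 1 := (pow_one _).symm
        _ ≤ (c : ℤ) ^ 6 := pow_le_six _ (by positivity) 1 (by omega) (by omega)
    omega
  · rintro ⟨k, ⟨hk0, _⟩, hk⟩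
    have h3 : k ^ 3 ≤ k ^ 6 := pow_le_six k hk0 3 (by omega) (by omega)
    have h2 : k ^ 2 ≤ k ^ 6 := pow_le_six k hk0 2 (by omega) (by omega)
    exact ⟨⟨k ^ 3, ⟨by positivity, by omega⟩, by nlinarith⟩,
           ⟨k ^ 2, ⟨by positivity, by omega⟩, by nlinarith⟩⟩

-- ===== VERDICT (by name: the statement is the Claim_ definition above) =====
theorem is_cubic_square_spec : Claim_equal_is_cubic_square := by
  intro n _
  unfold Spec_is_cubic_square is_cubic_square is_cubic_square_alt
  by_cases hn : n < 0
  · simp [hn]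
  · rw [not_lt] at hn
    simp only [if_neg (not_lt.mpr hn)]
    rw [flag_foldl_eq_any, flag_foldl_eq_any]
    simp only [Bool.false_or]
    set sq := (PySem.List.pyRange 0 (n + 1) 1).any (fun x => x * x == n) with hsq
    set cu := (PySem.List.pyRange 0 (n + 1) 1).any (fun y => y * y * y == n) with hcu
    have key : (sq && cu) = (PySem.List.pyRange 0 (n + 1) 1).any (fun k => k ^ 6 == n) := by
      rw [Bool.eq_iff_iff]
      simp only [Bool.and_eq_true, hsq, hcu, List.any_eq_true, PySem.List.mem_pyRange_one,
        beq_iff_eq]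
      exact six_iff n hn
    cases hs : sq <;> cases hc : cu <;> simp_all
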